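-- pv_equiv track=rewrite | github.com/DOMIAXEGDE/infinity | astronaut.py | max_primary_length
-- ===== SOURCE A (Python) =====
-- def max_primary_length(h: int, s: int, p: int) -> int:
--     if h < 2 or s < 1 or p < 2:
--         raise ValueError("Require h >= 2, s >= 1, p >= 2.")
--     target = pow(h, s)
--     lo, hi = 1, 1
--     while pow(p, hi) < target:
--         hi *= 2
--     while lo < hi:
--         mid = (lo + hi) // 2
--         if pow(p, mid) >= target:
--             hi = mid
--         else:
--             lo = mid + 1
--     return lo
-- ===== SOURCE B (Python) =====
-- def max_primary_length(h: int, s: int, p: int) -> int: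
--     if h < 2 or s < 1 or p < 2:
--         raise ValueError("Require h >= 2, s >= 1, p >= 2.")
--     target = pow(h, s)
--
--     # solve(pw, e) with pw == p**e: greedy binary decomposition of the largest
--     # exponent m with p**m < target, using bits of weight <= e; returns (m, p**m).
--     def solve(pw, e):
--         if pw < target:
--             m, acc = solve(pw * pw, e * 2)
--             if acc * pw < target:
--                 return (m + e, acc * pw)
--             return (m, acc)
--         return (0, 1)
--
--     m, _ = solve(p, 1)
--     return m + 1
-- ===== Notes on version B (the rewrite author's own statement) =====
-- stated objective: alternative
-- what changed: Replaces A's exponential-doubling upper bound plus lo/hi binary search with a recursive repeated-squaring greedy: solve(pw,e) squares up past the target and assembles the largest exponent with p**m < target bit by bit on the way back, returning m+1; no midpoint binary search and no pow() calls in a loop.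
import Mathlib
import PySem

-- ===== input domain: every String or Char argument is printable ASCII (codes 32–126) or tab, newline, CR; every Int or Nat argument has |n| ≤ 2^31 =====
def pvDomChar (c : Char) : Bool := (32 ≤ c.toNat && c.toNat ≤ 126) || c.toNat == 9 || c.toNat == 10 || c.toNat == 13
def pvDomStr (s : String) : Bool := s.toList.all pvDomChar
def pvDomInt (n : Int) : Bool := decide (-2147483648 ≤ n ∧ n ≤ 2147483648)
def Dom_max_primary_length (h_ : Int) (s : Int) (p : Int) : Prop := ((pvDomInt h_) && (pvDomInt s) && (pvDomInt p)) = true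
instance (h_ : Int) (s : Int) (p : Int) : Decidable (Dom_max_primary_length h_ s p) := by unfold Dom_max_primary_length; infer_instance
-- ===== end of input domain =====

-- B replaces A's doubling + binary search by a recursive repeated-squaring greedy that assembles the answer bit by bit (alternative algorithm, same results).


-- n + 1 ≤ 2^n, used only for the termination measures of the loops below
theorem pvTwoPowGrow (n : Nat) : n + 1 ≤ 2 ^ n := Nat.succ_le_of_lt (Nat.lt_two_pow_self)

theorem pvPowGrow {p : Int} (hp : 2 ≤ p) (n : Nat) : (n : Int) + 1 ≤ p ^ n := by
  calc ((n : Int) + 1) ≤ (2 : Int) ^ n := by exact_mod_cast pvTwoPowGrow n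
    _ ≤ p ^ n := pow_le_pow_left₀ (by norm_num) hp n

-- ===== PORT A =====
-- 'while pow(p, hi) < target: hi *= 2'; the '2 ≤ p ∧ 1 ≤ hi' conjuncts only make the
-- recursion total (they hold on every call reached from A's guarded entry).
def pvADouble (p target hi : Int) : Int :=
  if p ^ hi.toNat < target ∧ 2 ≤ p ∧ 1 ≤ hi then pvADouble p target (hi * 2) else hi
termination_by (target.toNat + 1) - hi.toNat
decreasing_by
  rename_i h
  obtain ⟨hlt, hp, hhi⟩ := h
  have h1 : (hi : Int) + 1 ≤ p ^ hi.toNat := by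
    have := pvPowGrow hp hi.toNat
    omega
  omega

-- the binary-search loop 'while lo < hi: …'
def pvABin (p target lo hi : Int) : Int :=
  if lo < hi then
    if p ^ (PySem.Int.floordiv (lo + hi) 2).toNat ≥ target then
      pvABin p target lo (PySem.Int.floordiv (lo + hi) 2)
    else pvABin p target (PySem.Int.floordiv (lo + hi) 2 + 1) hi
  else lo
termination_by (hi - lo).toNat
decreasing_by
  · rename_i hlt _
    have := PySem.Int.floordiv_two_mid_bounds (le_of_lt hlt)
    have hmlt : PySem.Int.floordiv (lo + hi) 2 < hi := by
      have := PySem.Int.floordiv_lt_iff_lt_mul (a := lo + hi) (b := 2) (q := hi) (by omega)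
      omega
    omega
  · rename_i hlt _
    have := PySem.Int.floordiv_two_mid_bounds (le_of_lt hlt)
    omega

def max_primary_length (h_ : Int) (s : Int) (p : Int) : Int :=
  if h_ < 2 ∨ s < 1 ∨ p < 2 then 0  -- Python raises ValueError here; excluded by Pre_
  else
    let target := h_ ^ s.toNat
    let hi := pvADouble p target 1
    pvABin p target 1 hi

-- ===== PORT B =====
-- solve(pw, e) with pw == p**e; the '2 ≤ pw' conjunct only makes the recursion
-- total (it holds on every call reached from B's guarded entry).
def pvBSolve (p target pw e : Int) : Int × Int :=
  if pw < target ∧ 2 ≤ pw then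
    let r := pvBSolve p target (pw * pw) (e * 2)
    if r.2 * pw < target then (r.1 + e, r.2 * pw) else r
  else (0, 1)
termination_by (target.toNat + 1) - pw.toNat
decreasing_by
  rename_i h
  obtain ⟨hlt, hpw⟩ := h
  have : pw + 1 ≤ pw * pw := by nlinarith
  omega

def max_primary_length_alt (h_ : Int) (s : Int) (p : Int) : Int :=
  if h_ < 2 ∨ s < 1 ∨ p < 2 then 0  -- Python raises ValueError here; excluded by Pre_
  else
    let target := h_ ^ s.toNat
    (pvBSolve p target p 1).1 + 1

-- ===== PRECONDITION & SPEC =====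
-- Pre_ excludes exactly the inputs on which A raises ValueError.
def Pre_max_primary_length (h_ : Int) (s : Int) (p : Int) : Prop := 2 ≤ h_ ∧ 1 ≤ s ∧ 2 ≤ p
instance (h_ : Int) (s : Int) (p : Int) : Decidable (Pre_max_primary_length h_ s p) := by unfold Pre_max_primary_length; infer_instance
def pvWitness_max_primary_length : Int × Int × Int := (3, 2, 2)

def Spec_max_primary_length (h_ : Int) (s : Int) (p : Int) (out : Int) : Prop := out = max_primary_length_alt h_ s p
instance (h_ : Int) (s : Int) (p : Int) (out : Int) : Decidable (Spec_max_primary_length h_ s p out) := by unfold Spec_max_primary_length; infer_instance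

-- ===== CLAIM (what is proved, stated in full; the proofs are below) =====
def Claim_equal_max_primary_length : Prop := ∀ (h_ : Int) (s : Int) (p : Int), Dom_max_primary_length h_ s p → Pre_max_primary_length h_ s p → Spec_max_primary_length h_ s p (max_primary_length h_ s p)

-- ===== LEMMAS AND PROOFS =====

-- P monotone: p^· is nondecreasing for 2 ≤ p
theorem pvPowMono {p : Int} (hp : 2 ≤ p) {a b : Nat} (hab : a ≤ b) : p ^ a ≤ p ^ b :=
  pow_le_pow_right₀ (by omega) hab

-- existence of an exponent reaching the target
theorem pvExists {p target : Int} (hp : 2 ≤ p) : ∃ n : Nat, target ≤ p ^ n := by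
  refine ⟨target.toNat, ?_⟩
  have := pvPowGrow hp target.toNat
  omega

-- the doubling loop returns hi with 1 ≤ hi and target ≤ p^hi
theorem pvADouble_spec {p target : Int} (hp : 2 ≤ p) :
    ∀ hi : Int, 1 ≤ hi → 1 ≤ pvADouble p target hi ∧ target ≤ p ^ (pvADouble p target hi).toNat := by
  intro hi hhi
  induction hi using pvADouble.induct p target with
  | case1 hi hcond ih =>
      rw [pvADouble, if_pos hcond]
      exact ih (by omega)
  | case2 hi hcond =>
      rw [pvADouble, if_neg hcond]
      refine ⟨hhi, ?_⟩
      by_contra hc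
      exact hcond ⟨by omega, hp, hhi⟩

-- binary search returns the least n with target ≤ p^n (as an Int), given the invariant
theorem pvABin_find {p target : Int} (hp : 2 ≤ p) {hex : ∃ n : Nat, target ≤ p ^ n} :
    ∀ lo hi : Int, 1 ≤ lo → lo ≤ hi → target ≤ p ^ hi.toNat →
      (∀ n : Nat, n < lo.toNat → ¬ target ≤ p ^ n) →
      pvABin p target lo hi = (Nat.find hex : Int) := by
  intro lo hi
  induction lo, hi using pvABin.induct p target with
  | case1 lo hi hlt hge ih =>
      intro hlo hle hhi hbelow
      rw [pvABin, if_pos hlt, if_pos hge]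
      have hb := PySem.Int.floordiv_two_mid_bounds (le_of_lt hlt)
      exact ih hlo (by omega) (by simpa using hge) hbelow
  | case2 lo hi hlt hge ih =>
      intro hlo hle hhi hbelow
      rw [pvABin, if_pos hlt, if_neg hge]
      have hb := PySem.Int.floordiv_two_mid_bounds (le_of_lt hlt)
      have hmlt : PySem.Int.floordiv (lo + hi) 2 < hi := by
        have := PySem.Int.floordiv_lt_iff_lt_mul (a := lo + hi) (b := 2) (q := hi) (by omega)
        omega
      refine ih (by omega) (by omega) hhi ?_
      intro n hn hcon
      have hnm : n ≤ (PySem.Int.floordiv (lo + hi) 2).toNat := by omega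
      exact hge (by simpa using le_trans hcon (pvPowMono hp hnm))
  | case3 lo hi hlt =>
      intro hlo hle hhi hbelow
      rw [pvABin, if_neg hlt]
      have hloeq : lo = hi := by omega
      subst hloeq
      have h1 : Nat.find hex ≤ lo.toNat := Nat.find_le hhi
      have h2 : lo.toNat ≤ Nat.find hex := by
        by_contra hc
        exact hbelow _ (by omega) (Nat.find_spec hex)
      omega

-- solve returns (m, p^m) with p^m < target ≤ p^(m + 2^k), given pw = p^(2^k), e = 2^k
theorem pvBSolve_spec {p target : Int} (hp : 2 ≤ p) (ht : 2 ≤ target) :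
    ∀ pw e : Int, ∀ k : Nat, pw = p ^ (2 ^ k) → e = ((2 ^ k : Nat) : Int) →
      ∃ m : Nat, pvBSolve p target pw e = ((m : Int), p ^ m) ∧
        p ^ m < target ∧ target ≤ p ^ (m + 2 ^ k) := by
  intro pw e
  induction pw, e using pvBSolve.induct p target with
  | case1 pw e hcond r hinner ih =>
      intro k hpw he
      have hrdef : r = pvBSolve p target (pw * pw) (e * 2) := rfl
      rw [hrdef] at hinner
      rw [pvBSolve, if_pos hcond]
      have hpw2 : pw * pw = p ^ (2 ^ (k + 1)) := by
        rw [hpw, ← pow_add]; congr 1; omega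
      have he2 : e * 2 = ((2 ^ (k + 1) : Nat) : Int) := by
        rw [he]; push_cast; ring
      obtain ⟨m, hr, hlt, hub⟩ := ih (k + 1) hpw2 he2
      rw [hr] at hinner ⊢
      simp only [if_pos hinner]
      refine ⟨m + 2 ^ k, ?_, ?_, ?_⟩
      · rw [hpw, ← pow_add, he]; push_cast; ring_nf
      · rw [pow_add, ← hpw]; exact hinner
      · have hmm : m + 2 ^ k + 2 ^ k = m + 2 ^ (k + 1) := by omega
        rw [hmm]; exact hub
  | case2 pw e hcond r hinner ih =>
      intro k hpw he
      have hrdef : r = pvBSolve p target (pw * pw) (e * 2) := rfl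
      rw [hrdef] at hinner
      rw [pvBSolve, if_pos hcond]
      have hpw2 : pw * pw = p ^ (2 ^ (k + 1)) := by
        rw [hpw, ← pow_add]; congr 1; omega
      have he2 : e * 2 = ((2 ^ (k + 1) : Nat) : Int) := by
        rw [he]; push_cast; ring
      obtain ⟨m, hr, hlt, hub⟩ := ih (k + 1) hpw2 he2
      rw [hr] at hinner ⊢
      simp only [if_neg hinner]
      refine ⟨m, rfl, hlt, ?_⟩
      rw [pow_add, ← hpw]
      simp only [not_lt] at hinner
      exact hinner
  | case3 pw e hcond =>
      intro k hpw he
      rw [pvBSolve, if_neg hcond]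
      have hpwge : 2 ≤ pw := by
        rw [hpw]
        calc (2 : Int) ≤ p := hp
          _ = p ^ 1 := (pow_one p).symm
          _ ≤ p ^ (2 ^ k) := pvPowMono hp (Nat.one_le_two_pow)
      have htle : target ≤ pw := by
        by_contra hc
        exact hcond ⟨by omega, hpwge⟩
      exact ⟨0, by norm_num, by simpa using ht, by simpa [← hpw] using htle⟩

-- ===== VERDICT (by name: the statement is the Claim_ definition above) =====
theorem max_primary_length_spec : Claim_equal_max_primary_length := by
  intro h_ s p _ hpre
  obtain ⟨hh, hs, hp⟩ := hpre
  unfold Spec_max_primary_length max_primary_length max_primary_length_alt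
  rw [if_neg (by omega), if_neg (by omega)]
  have hex : ∃ n : Nat, h_ ^ s.toNat ≤ p ^ n := pvExists hp
  have htgt : 2 ≤ h_ ^ s.toNat := by
    have h1 : (2 : Int) ^ s.toNat ≤ h_ ^ s.toNat := pow_le_pow_left₀ (by norm_num) hh _
    have h2 : (2 : Int) = 2 ^ 1 := by norm_num
    have h3 : (2 : Int) ^ 1 ≤ 2 ^ s.toNat := pvPowMono (by norm_num) (by omega)
    omega
  obtain ⟨hhi1, hhige⟩ := pvADouble_spec hp (target := h_ ^ s.toNat) 1 le_rfl
  rw [pvABin_find hp (hex := hex) 1 _ le_rfl hhi1 hhige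
      (by intro n hn hcon
          have hn0 : n = 0 := by omega
          subst hn0; simp at hcon; omega)]
  obtain ⟨m, hr, hlt, hub⟩ :=
    pvBSolve_spec hp htgt p 1 0 (by norm_num) (by norm_num)
  simp only [hr]
  have h1 : Nat.find hex ≤ m + 1 := Nat.find_le (by simpa using hub)
  have h2 : m < Nat.find hex := by
    by_contra hc
    have hfm : Nat.find hex ≤ m := by omega
    have := le_trans (Nat.find_spec hex) (pvPowMono hp hfm)
    omega
  have : Nat.find hex = m + 1 := by omega
  rw [this]
  push_cast
  ring
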